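-- pv_equiv track=rewrite | github.com/diieus/PFE | wrapper/multiple.py | multiple_parser
-- ===== SOURCE A (Python) =====
-- def suite(n):
--     """
--     Gives the position of the x_n variable.
--     """
--     return (1 + n + (n * (n - 1)) // 2)
--
-- def half_split(n, F, a, b):
--     """
--     Splits a system in two subsystems.
--     """
--     stack = []
--     c = suite(n)
--     stack.append((F[:c], a))
--     F[0] = F[0] ^ F[c]
--     for i in [suite(x) for x in range(n)]:
--         c += 1
--         F[i] = F[i] ^ F[c]
--     stack.append((F[:c], b))
--     return stack
--
-- def multiple_parser(n, F):
--     """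
--     Parses a 32 + k variables system into a list of 2 ** k "32 variables" subsystems.
--     """
--     #If n <= 32, simply return F
--     if n < 33:
--         return [(F,0)]
--
--     stack = []
--     temp = []
--
--     #First split
--     n_temp = n - 1
--     stack += half_split(n_temp, F[:], 0, 1)
--
--     #All the other splits
--     while(n_temp > 32):
--         n_temp -= 1
--         temp = stack
--         stack = []
--         for e in temp:
--             stack += half_split(n_temp, e[0], e[1], e[1] + (1 << n - 1 - n_temp))
--     return stack
-- ===== SOURCE B (Python) =====
-- def multiple_parser(n, F):
--     """
--     Parses a 32 + k variables system into a list of 2 ** k subsystems,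
--     by recursive divide-and-conquer instead of a breadth-first worklist.
--     """
--     if n < 33:
--         return [(F, 0)]
--
--     def split(L, G, label):
--         if L < 32:
--             return [(G, label)]
--         c = 1 + L + (L * (L - 1)) // 2
--         right = G[:c + L]
--         right[0] ^= G[c]
--         for x in range(L):
--             i = 1 + x + (x * (x - 1)) // 2
--             right[i] ^= G[c + 1 + x]
--         off = 1 << (n - 1 - L)
--         return split(L - 1, G[:c], label) + split(L - 1, right, label + off)
--
--     return split(n - 1, F[:], 0)
-- ===== Notes on version B (the rewrite author's own statement) =====
-- stated objective: alternative
-- what changed: The breadth-first worklist (repeatedly rebuilding the whole stack level by level via half_split's in-place mutation of the full parent) is replaced by a recursive depth-first divide-and-conquer split in which each child is built by xor-ing into a sliced copy, reading the partner values from the untouched parent.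
import Mathlib
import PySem

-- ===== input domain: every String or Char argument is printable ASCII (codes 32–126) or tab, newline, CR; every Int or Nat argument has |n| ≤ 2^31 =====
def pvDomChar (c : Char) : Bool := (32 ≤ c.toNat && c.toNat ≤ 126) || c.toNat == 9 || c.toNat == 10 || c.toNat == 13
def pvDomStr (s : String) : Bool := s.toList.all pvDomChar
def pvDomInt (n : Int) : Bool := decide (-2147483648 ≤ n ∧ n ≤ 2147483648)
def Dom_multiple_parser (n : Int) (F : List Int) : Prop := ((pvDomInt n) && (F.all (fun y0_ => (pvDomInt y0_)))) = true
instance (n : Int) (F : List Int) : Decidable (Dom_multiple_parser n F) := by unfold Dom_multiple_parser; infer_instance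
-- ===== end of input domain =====

-- B replaces A's breadth-first worklist by a recursive depth-first divide-and-conquer split
-- (alternative decomposition, same asymptotic cost); return values agree on all of Pre_.

-- ===== PORT A =====
-- suite(n) = 1 + n + (n*(n-1)) // 2
def suiteA (x : Int) : Int := 1 + x + PySem.Int.floordiv (x * (x - 1)) 2

-- half_split: the in-place xors F[i] ^= F[c] are ported as pySetD/pyGetD over the list state;
-- out-of-range indices (IndexError in Python) are excluded by Pre_ (pyGetD default 0 / pySetD no-op there).
-- loop body of half_split ('c += 1; F[i] = F[i] ^ F[c]'), state (c, F)
def stepA (st : Int × List Int) (i : Int) : Int × List Int :=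
  (st.1 + 1, PySem.List.pySetD st.2 i (PySem.Int.bxor (PySem.List.pyGetD st.2 i 0) (PySem.List.pyGetD st.2 (st.1 + 1) 0)))

def half_splitA (m : Int) (F : List Int) (a b : Int) : List (List Int × Int) :=
  let c := suiteA m
  let left := (PySem.List.slice F none (some c), a)
  let F1 := PySem.List.pySetD F 0 (PySem.Int.bxor (PySem.List.pyGetD F 0 0) (PySem.List.pyGetD F c 0))
  -- for i in [suite(x) for x in range(m)]: c += 1; F[i] = F[i] ^ F[c]
  let s := ((PySem.List.pyRange 0 m 1).map suiteA).foldl stepA (c, F1)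
  [left, (PySem.List.slice s.2 none (some s.1), b)]

-- the while-loop: fuel = number of iterations, (n - 33).toNat; n_temp is decremented first each round.
-- Python's 1 << (n - 1 - n_temp) is (1 : Int) <<< (…).toNat; the exponent is ≥ 1 in every reachable round.
def mpLoopA (n : Int) : Nat → Int → List (List Int × Int) → List (List Int × Int)
  | 0, _, stack => stack
  | k + 1, n_temp, stack =>
      let nt := n_temp - 1
      let stack' := stack.foldl
        (fun acc e => acc ++ half_splitA nt e.1 e.2 (e.2 + ((1 : Int) <<< (n - 1 - nt).toNat))) []
      mpLoopA n k nt stack'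

def multiple_parser (n : Int) (F : List Int) : List (List Int × Int) :=
  if n < 33 then [(F, 0)]
  else
    let n_temp := n - 1
    let stack := ([] : List (List Int × Int)) ++ half_splitA n_temp (PySem.List.slice F none none) 0 1
    mpLoopA n (n - 33).toNat n_temp stack

-- ===== PORT B =====
-- loop body of B's xor loop ('right[i] ^= G[c + 1 + x]' with i = 1 + x + x*(x-1)//2)
def stepB (G : List Int) (c : Int) (R : List Int) (x : Int) : List Int :=
  let i := 1 + x + PySem.Int.floordiv (x * (x - 1)) 2
  PySem.List.pySetD R i (PySem.Int.bxor (PySem.List.pyGetD R i 0) (PySem.List.pyGetD G (c + 1 + x) 0))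

-- recursive divide-and-conquer: each child is built by xor-ing into a sliced copy (right = G[:c+L] mutated),
-- children concatenated left-then-right; same totalisation of the in-place ops as in port A.
def splitB (n : Int) (L : Int) (G : List Int) (label : Int) : List (List Int × Int) :=
  if L < 32 then [(G, label)]
  else
    let c := 1 + L + PySem.Int.floordiv (L * (L - 1)) 2
    let r0 := PySem.List.slice G none (some (c + L))
    let r1 := PySem.List.pySetD r0 0 (PySem.Int.bxor (PySem.List.pyGetD r0 0 0) (PySem.List.pyGetD G c 0))
    let right := (PySem.List.pyRange 0 L 1).foldl (stepB G c) r1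
    splitB n (L - 1) (PySem.List.slice G none (some c)) label ++
      splitB n (L - 1) right (label + ((1 : Int) <<< (n - 1 - L).toNat))
termination_by (L - 31).toNat
decreasing_by all_goals omega

def multiple_parser_alt (n : Int) (F : List Int) : List (List Int × Int) :=
  if n < 33 then [(F, 0)] else splitB n (n - 1) (PySem.List.slice F none none) 0

-- ===== PRECONDITION & SPEC =====
-- Pre_ excludes exactly the inputs on which Python A raises IndexError: n ≥ 33 with F shorter
-- than suite(n) = 1 + n + n(n-1)//2 entries (the first half_split then reads past the end of F).
def Pre_multiple_parser (n : Int) (F : List Int) : Prop :=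
  n < 33 ∨ 1 + n + PySem.Int.floordiv (n * (n - 1)) 2 ≤ (F.length : Int)
instance (n : Int) (F : List Int) : Decidable (Pre_multiple_parser n F) := by
  unfold Pre_multiple_parser; infer_instance

def pvWitness_multiple_parser : Int × List Int := (5, [1, 2, 3])

def Spec_multiple_parser (n : Int) (F : List Int) (out : List (List Int × Int)) : Prop := out = multiple_parser_alt n F
instance (n : Int) (F : List Int) (out : List (List Int × Int)) : Decidable (Spec_multiple_parser n F out) := by unfold Spec_multiple_parser; infer_instance

-- ===== CLAIM (what is proved, stated in full; the proofs are below) =====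
def Claim_equal_multiple_parser : Prop := ∀ (n : Int) (F : List Int), Dom_multiple_parser n F → Pre_multiple_parser n F → Spec_multiple_parser n F (multiple_parser n F)

-- ===== LEMMAS AND PROOFS =====

-- 2 * suite(x), closed form (x*(x-1) is even, so the floor division is exact)
lemma suiteA_two_mul (x : Int) : 2 * suiteA x = x * x + x + 2 := by
  obtain ⟨k, hk⟩ : Even ((x - 1) * (x - 1 + 1)) := Int.even_mul_succ_self (x - 1)
  have hx : x * (x - 1) = 2 * k := by linear_combination hk
  have hfd : PySem.Int.floordiv (x * (x - 1)) 2 = k := by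
    rw [hx, PySem.Int.floordiv_eq_ediv_of_pos (by norm_num)]
    exact Int.mul_ediv_cancel_left k (by norm_num)
  unfold suiteA; rw [hfd]; linear_combination -hx

lemma suiteA_pos {x : Int} (hx : 0 ≤ x) : 1 ≤ suiteA x := by
  nlinarith [suiteA_two_mul x]

lemma suiteA_lt {x m : Int} (hx : 0 ≤ x) (hxm : x < m) : suiteA x < suiteA m := by
  nlinarith [suiteA_two_mul x, suiteA_two_mul m]

-- reading at a nonnegative index, through the total default-0 accessor
lemma pyRd_nonneg (xs : List Int) {i : Int} (h : 0 ≤ i) :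
    PySem.List.pyGetD xs i 0 = (xs[i.toNat]?).getD 0 := by
  simp [PySem.List.pyGetD, PySem.List.pyGet?_of_nonneg _ h]

-- a read below N sees the same value in the N-prefix
lemma pyRd_take (xs : List Int) {i : Int} {N : Nat} (h0 : 0 ≤ i) (hN : i < (N : Int)) :
    PySem.List.pyGetD (xs.take N) i 0 = PySem.List.pyGetD xs i 0 := by
  rw [pyRd_nonneg _ h0, pyRd_nonneg _ h0, List.getElem?_take_of_lt (by omega)]

-- a write at a nonnegative index i ≠ j does not change the value read at j
lemma pyRd_set_ne (xs : List Int) {i j : Int} (v : Int) (hi : 0 ≤ i) (hj : 0 ≤ j) (hne : i ≠ j) :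
    PySem.List.pyGetD (PySem.List.pySetD xs i v) j 0 = PySem.List.pyGetD xs j 0 := by
  rw [PySem.List.pySetD_of_nonneg _ _ hi, pyRd_nonneg _ hj, pyRd_nonneg _ hj,
    List.getElem?_set_ne (by omega)]

-- a write at a nonnegative index commutes with taking the N-prefix
lemma pySetD_take (xs : List Int) {i : Int} {N : Nat} (v : Int) (h0 : 0 ≤ i) :
    PySem.List.pySetD (xs.take N) i v = (PySem.List.pySetD xs i v).take N := by
  rw [PySem.List.pySetD_of_nonneg _ _ h0, PySem.List.pySetD_of_nonneg _ _ h0, List.take_set]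

-- one xor step, simulated on the N-prefix (write at index 0 ≤ i < N, xor-operand w agreed on)
lemma step_sim (FA : List Int) {i : Int} {N : Nat} (w : Int)
    (hi0 : 0 ≤ i) (hiN : i < (N : Int)) :
    PySem.List.pySetD (FA.take N) i (PySem.Int.bxor (PySem.List.pyGetD (FA.take N) i 0) w) =
      (PySem.List.pySetD FA i (PySem.Int.bxor (PySem.List.pyGetD FA i 0) w)).take N := by
  rw [pyRd_take FA hi0 hiN, pySetD_take FA _ hi0]

-- the inner xor loops of A (with counter state, reads from the evolving full list) and of
-- B (on the N-prefix, reads from the untouched original G) run in lockstep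
lemma foldSim (G : List Int) (c : Int) (N : Nat) :
    ∀ (k : Nat) (FA : List Int),
      (∀ j : Int, c ≤ j → PySem.List.pyGetD FA j 0 = PySem.List.pyGetD G j 0) →
      (∀ x : Int, 0 ≤ x → x < (k : Int) → 1 ≤ suiteA x ∧ suiteA x < c) →
      (0 ≤ c) → (c + (k : Int) ≤ (N : Int)) →
      (((PySem.List.pyRange 0 (k : Int) 1).map suiteA).foldl stepA (c, FA)).1 = c + (k : Int) ∧
      (PySem.List.pyRange 0 (k : Int) 1).foldl (stepB G c) (FA.take N) =
        (((PySem.List.pyRange 0 (k : Int) 1).map suiteA).foldl stepA (c, FA)).2.take N ∧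
      (∀ j : Int, c ≤ j →
        PySem.List.pyGetD (((PySem.List.pyRange 0 (k : Int) 1).map suiteA).foldl stepA (c, FA)).2 j 0 =
          PySem.List.pyGetD G j 0) := by
  intro k
  induction k with
  | zero =>
    intro FA hFG hsuite hc hcN
    rw [show ((0 : Nat) : Int) = 0 from rfl, PySem.List.pyRange_one_eq_nil (by omega)]
    exact ⟨by simp, rfl, hFG⟩
  | succ k ih =>
    intro FA hFG hsuite hc hcN
    have hk1 : ((k + 1 : Nat) : Int) = (k : Int) + 1 := by push_cast; ring
    rw [hk1, PySem.List.pyRange_one_succ_right (by positivity)]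
    obtain ⟨h1, h2, h3⟩ := ih FA hFG
      (fun x hx0 hxk => hsuite x hx0 (by omega)) hc (by push_cast at hcN ⊢; omega)
    have hsk := hsuite (k : Int) (by positivity) (by omega)
    simp only [List.map_append, List.foldl_append, List.map_cons, List.map_nil,
      List.foldl_cons, List.foldl_nil]
    rw [h2]
    set P := ((PySem.List.pyRange 0 (k : Int) 1).map suiteA).foldl stepA (c, FA) with hP
    refine ⟨by simp only [stepA]; omega, ?_, ?_⟩
    · -- the k-th step commutes with the N-prefix
      simp only [stepA, stepB]
      rw [show (1 + (k : Int) + PySem.Int.floordiv ((k : Int) * ((k : Int) - 1)) 2) = suiteA (k : Int) from rfl]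
      rw [h1, show c + (k : Int) + 1 = c + 1 + (k : Int) by ring]
      rw [h3 (c + 1 + (k : Int)) (by omega)]
      exact step_sim P.2 _ (by omega) (by omega)
    · intro j hj
      simp only [stepA]
      rw [pyRd_set_ne P.2 _ (by omega) (by omega) (by omega)]
      exact h3 j hj

-- A's half_split, described as B computes it: untouched c-prefix on the left,
-- xor-ed (c+m)-prefix on the right
lemma half_splitA_eq (m : Int) (hm : 32 ≤ m) (G : List Int) (a b : Int) :
    half_splitA m G a b =
      [(PySem.List.slice G none (some (suiteA m)), a),
       ((PySem.List.pyRange 0 m 1).foldl (stepB G (suiteA m))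
          (PySem.List.pySetD (PySem.List.slice G none (some (suiteA m + m))) 0
            (PySem.Int.bxor (PySem.List.pyGetD (PySem.List.slice G none (some (suiteA m + m))) 0 0)
              (PySem.List.pyGetD G (suiteA m) 0))), b)] := by
  have hc1 : 1 ≤ suiteA m := suiteA_pos (by omega)
  set c := suiteA m with hcdef
  have hcm : (0 : Int) ≤ c + m := by omega
  have hNc : (((c + m).toNat : Nat) : Int) = c + m := Int.toNat_of_nonneg hcm
  have hmN : ((m.toNat : Nat) : Int) = m := Int.toNat_of_nonneg (by omega)
  -- the initial write F[0] ^= F[c], on the full list and on the (c+m)-prefix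
  have hinit : PySem.List.pySetD (G.take (c + m).toNat) 0
        (PySem.Int.bxor (PySem.List.pyGetD (G.take (c + m).toNat) 0 0) (PySem.List.pyGetD G c 0)) =
      (PySem.List.pySetD G 0
        (PySem.Int.bxor (PySem.List.pyGetD G 0 0) (PySem.List.pyGetD G c 0))).take (c + m).toNat := by
    exact step_sim (N := (c + m).toNat) G (PySem.List.pyGetD G c 0) (le_refl 0) (by omega)
  have hFG : ∀ j : Int, c ≤ j →
      PySem.List.pyGetD (PySem.List.pySetD G 0
        (PySem.Int.bxor (PySem.List.pyGetD G 0 0) (PySem.List.pyGetD G c 0))) j 0 =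
      PySem.List.pyGetD G j 0 := fun j hj =>
    pyRd_set_ne G _ (le_refl 0) (by omega) (by omega)
  obtain ⟨h1, h2, h3⟩ := foldSim G c (c + m).toNat m.toNat _ hFG
    (fun x hx0 hxm => ⟨suiteA_pos hx0, hcdef ▸ suiteA_lt hx0 (by omega)⟩) (by omega) (by omega)
  rw [hmN] at h1 h2
  simp only [half_splitA]
  rw [← hcdef, h1]
  simp only [PySem.List.slice_to _ hcm]
  rw [hinit, ← h2]
-- one level of B's recursion = one worklist split of A followed by the recursion on both children
lemma split_step (n L : Int) (hL : 32 ≤ L) (G : List Int) (a : Int) :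
    splitB n L G a =
      (half_splitA L G a (a + ((1 : Int) <<< (n - 1 - L).toNat))).flatMap
        (fun e => splitB n (L - 1) e.1 e.2) := by
  rw [splitB, if_neg (by omega), half_splitA_eq L hL G a]
  rw [show (1 + L + PySem.Int.floordiv (L * (L - 1)) 2) = suiteA L from rfl]
  simp only [List.flatMap_cons, List.flatMap_nil, List.append_nil]

-- BFS worklist = DFS flatMap, level by level
lemma loop_eq (n : Int) : ∀ (k : Nat) (stack : List (List Int × Int)),
    mpLoopA n k (32 + (k : Int)) stack =
      stack.flatMap (fun e => splitB n (31 + (k : Int)) e.1 e.2) := by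
  intro k
  induction k with
  | zero =>
    intro stack
    have hleaf : ∀ e : List Int × Int, splitB n 31 e.1 e.2 = [e] := by
      intro e; rw [splitB, if_pos (by omega)]
    simp [mpLoopA, hleaf]
  | succ k ih =>
    intro stack
    simp only [mpLoopA]
    rw [show 32 + ((k + 1 : Nat) : Int) - 1 = 32 + (k : Int) by push_cast; ring]
    rw [PySem.List.foldl_append_eq_flatMap, List.nil_append, ih, List.flatMap_assoc]
    rw [show (31 : Int) + ((k + 1 : Nat) : Int) = 32 + (k : Int) by push_cast; ring]
    congr 1
    funext e
    rw [split_step n (32 + (k : Int)) (by omega) e.1 e.2]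
    congr 1
    funext e'
    rw [show 32 + (k : Int) - 1 = 31 + (k : Int) by ring]

-- ===== VERDICT (by name: the statement is the Claim_ definition above) =====
theorem multiple_parser_spec : Claim_equal_multiple_parser := by
  unfold Claim_equal_multiple_parser
  intro n F _ _
  show multiple_parser n F = multiple_parser_alt n F
  by_cases hn : n < 33
  · simp only [multiple_parser, multiple_parser_alt, if_pos hn]
  · have h0 : n - 1 - (n - 1) = (0 : Int) := by ring
    have hb : (0 : Int) + ((1 : Int) <<< ((n - 1 - (n - 1)).toNat)) = 1 := by rw [h0]; decide
    simp only [multiple_parser, multiple_parser_alt, if_neg hn]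
    rw [List.nil_append, split_step n (n - 1) (by omega), hb,
        show n - 1 = 32 + (((n - 33).toNat) : Int) by omega, loop_eq n,
        show (31 : Int) + (((n - 33).toNat) : Int) = 32 + (((n - 33).toNat) : Int) - 1 by ring]
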